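-- pv_equiv track=rewrite | github.com/jeonbar2/Coding_Test | 프로그래머스/lv1/17681. ［1차］ 비밀지도/［1차］ 비밀지도.py | solution
-- ===== SOURCE A (Python) =====
-- def solution(n, arr1, arr2):
--     answer = []
--     x=[]
--     y=[]
--     for i in arr1:
--         a=''
--         temp = i
--         for j in range(0,n):
--             if temp % 2 == 0 :
--                 a+="0"
--             else:
--                 a+="1"
--             temp = temp//2
--
--         x.append(a[::-1])
--     for i in arr2:
--         a=''
--         temp = i
--         for j in range(0,n):
--             if temp % 2 == 0 :
--                 a+="0"
--             else:
--                 a+="1"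
--             temp = temp//2
--
--         y.append(a[::-1])
--
--     for i in range(0,n):
--         asd=''
--         for j in range(0,n):
--             if x[i][j] == '1' or y[i][j]=='1':
--                 asd+='#'
--             else:
--                 asd+=' '
--         answer.append(asd)
--     return answer
-- ===== SOURCE B (Python) =====
-- def solution(n, arr1, arr2):
--     return [''.join('#' if (arr1[i] >> k) & 1 or (arr2[i] >> k) & 1 else ' '
--                     for k in range(n - 1, -1, -1))
--             for i in range(n)]
-- ===== Notes on version B (the rewrite author's own statement) =====
-- stated objective: faster
-- what changed: B extracts each cell directly with integer bit operations ((arr[i] >> k) & 1) in one nested comprehension built MSB-first, instead of A's two passes that build reversed binary strings for every entry of both arrays and a third pass that merges them character by character. Pre_ requires both arrays to hold at least n entries: outside it both programs raise IndexError, except on the accidental corner where the 'or' short-circuit skips every out-of-range arr2 read (all examined arr1 bits are 1) and both still return the same all-'#' rows; the ports use total lookups, so that corner is excluded.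
-- outside the precondition, e.g. on solution(1, [1], []): A returns ['#'], B returns ['#']
import Mathlib
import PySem

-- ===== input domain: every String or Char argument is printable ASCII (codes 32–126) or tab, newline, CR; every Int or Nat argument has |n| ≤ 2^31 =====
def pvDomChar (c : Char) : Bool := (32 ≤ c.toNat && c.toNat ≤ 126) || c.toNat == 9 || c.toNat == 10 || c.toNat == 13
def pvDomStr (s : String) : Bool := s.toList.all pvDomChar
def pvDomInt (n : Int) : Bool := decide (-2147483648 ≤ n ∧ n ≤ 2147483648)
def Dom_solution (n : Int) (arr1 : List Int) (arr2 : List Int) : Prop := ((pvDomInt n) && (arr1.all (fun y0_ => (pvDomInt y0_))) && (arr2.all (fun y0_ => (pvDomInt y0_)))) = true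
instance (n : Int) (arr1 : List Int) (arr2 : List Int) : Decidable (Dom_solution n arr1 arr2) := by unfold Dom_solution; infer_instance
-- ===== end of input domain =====

-- B replaces A's three passes (reversed binary strings of both arrays, then a char-level merge)
-- by one nested comprehension extracting each cell directly with integer bit operations.

-- ===== PORT A =====
-- the inner 'for j in range(0, n)' loop of A: state (a, temp); then a[::-1] (reverse, cf. slice?_none_none_neg_one)
def pvRowBits (n : Int) (i : Int) : List Char :=
  (((PySem.List.pyRange 0 n 1).foldl
      (fun (st : List Char × Int) _ =>
        (st.1 ++ [if PySem.Int.mod st.2 2 == 0 then '0' else '1'], PySem.Int.floordiv st.2 2))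
      ([], i)).1).reverse

def solution (n : Int) (arr1 : List Int) (arr2 : List Int) : List String :=
  let x : List (List Char) := arr1.foldl (fun acc i => acc ++ [pvRowBits n i]) []
  let y : List (List Char) := arr2.foldl (fun acc i => acc ++ [pvRowBits n i]) []
  (PySem.List.pyRange 0 n 1).foldl
    (fun answer i =>
      answer ++ [String.ofList ((PySem.List.pyRange 0 n 1).foldl
        (fun asd j =>
          asd ++ [if PySem.List.pyGetD (PySem.List.pyGetD x i []) j ' ' == '1'
                    || PySem.List.pyGetD (PySem.List.pyGetD y i []) j ' ' == '1'
                  then '#' else ' '])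
        [])])
    []

-- ===== PORT B =====
-- Python's '(arr1[i] >> k) & 1 or (arr2[i] >> k) & 1' in boolean position = either bit nonzero
def solution_alt (n : Int) (arr1 : List Int) (arr2 : List Int) : List String :=
  (PySem.List.pyRange 0 n 1).map (fun i =>
    String.ofList ((PySem.List.pyRange (n - 1) (-1) (-1)).map (fun k =>
      if (PySem.Int.band (PySem.List.pyGetD arr1 i 0 >>> k.toNat) 1 != 0)
         || (PySem.Int.band (PySem.List.pyGetD arr2 i 0 >>> k.toNat) 1 != 0)
      then '#' else ' ')))

-- ===== PRECONDITION & SPEC =====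
-- Pre_ requires both arrays to hold at least n entries: outside it both programs raise IndexError,
-- except on the accidental corner where the 'or' short-circuit skips every out-of-range arr2 read
-- (all examined arr1 bits are 1) and both still return the same all-'#' rows; the ports use total
-- lookups, so that corner is excluded.
def Pre_solution (n : Int) (arr1 : List Int) (arr2 : List Int) : Prop :=
  n ≤ (arr1.length : Int) ∧ n ≤ (arr2.length : Int)
instance (n : Int) (arr1 : List Int) (arr2 : List Int) : Decidable (Pre_solution n arr1 arr2) := by unfold Pre_solution; infer_instance
def pvWitness_solution : Int × List Int × List Int := (2, [9, 20], [30, 1])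
def Spec_solution (n : Int) (arr1 : List Int) (arr2 : List Int) (out : List String) : Prop := out = solution_alt n arr1 arr2
instance (n : Int) (arr1 : List Int) (arr2 : List Int) (out : List String) : Decidable (Spec_solution n arr1 arr2 out) := by unfold Spec_solution; infer_instance

-- ===== CLAIM (what is proved, stated in full; the proofs are below) =====
def Claim_equal_solution : Prop := ∀ (n : Int) (arr1 : List Int) (arr2 : List Int), Dom_solution n arr1 arr2 → Pre_solution n arr1 arr2 → Spec_solution n arr1 arr2 (solution n arr1 arr2)

-- ===== LEMMAS AND PROOFS =====

-- the bit string A's inner loop produces, least-significant bit first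
def pvBitsLSB : Nat → Int → List Char
  | 0, _ => []
  | N + 1, t => (if PySem.Int.mod t 2 == 0 then '0' else '1') :: pvBitsLSB N (PySem.Int.floordiv t 2)

theorem pvBitsLSB_length (N : Nat) (t : Int) : (pvBitsLSB N t).length = N := by
  induction N generalizing t with
  | zero => rfl
  | succ N ih => simp [pvBitsLSB, ih]

theorem pvFold_eq (l : List Int) (acc : List Char) (t : Int) :
    ((l.foldl
      (fun (st : List Char × Int) _ =>
        (st.1 ++ [if PySem.Int.mod st.2 2 == 0 then '0' else '1'], PySem.Int.floordiv st.2 2))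
      (acc, t)).1) = acc ++ pvBitsLSB l.length t := by
  induction l generalizing acc t with
  | nil => simp [pvBitsLSB]
  | cons a l ih =>
    rw [List.foldl_cons, ih]
    simp [pvBitsLSB]

theorem pvRowBits_eq (n : Int) (i : Int) :
    pvRowBits n i = (pvBitsLSB n.toNat i).reverse := by
  unfold pvRowBits
  rw [pvFold_eq]
  simp [PySem.List.length_pyRange_one]

theorem pvShift_succ (t : Int) (j : Nat) :
    PySem.Int.floordiv t 2 >>> j = t >>> (j + 1) := by
  rw [PySem.Int.floordiv_eq_ediv_of_pos (by norm_num)]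
  rw [Int.shiftRight_eq_div_pow, Int.shiftRight_eq_div_pow]
  push_cast
  rw [Int.ediv_ediv_eq_ediv_mul (by norm_num)]
  ring_nf

theorem pvBitsLSB_getD (N : Nat) (t : Int) (j : Nat) (d : Char) (h : j < N) :
    (pvBitsLSB N t).getD j d = if PySem.Int.mod (t >>> j) 2 == 0 then '0' else '1' := by
  induction N generalizing t j with
  | zero => omega
  | succ N ih =>
    cases j with
    | zero => simp [pvBitsLSB]
    | succ j =>
      have h' := ih (PySem.Int.floordiv t 2) j (by omega)
      rw [pvShift_succ] at h'
      simpa [pvBitsLSB] using h'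

-- one cell of A's bit string, read from the most significant side, as a bit test
theorem pvCellBit (N : Nat) (a : Int) (j : Nat) (hj : j < N) :
    ((pvBitsLSB N a).reverse.getD j ' ' == '1') =
      (PySem.Int.band (a >>> (N - 1 - j)) 1 != 0) := by
  have hlen : (pvBitsLSB N a).length = N := pvBitsLSB_length _ _
  have hrev : (pvBitsLSB N a).reverse.getD j ' ' =
      (pvBitsLSB N a).getD (N - 1 - j) ' ' := by
    rw [List.getD_eq_getElem?_getD, List.getD_eq_getElem?_getD, List.getElem?_reverse (by omega)]
    rw [hlen]
  rw [hrev, pvBitsLSB_getD _ _ _ _ (by omega), PySem.Int.band_one,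
    PySem.Int.mod_eq_emod_of_pos (by norm_num)]
  rcases Int.emod_two_eq (a >>> (N - 1 - j)) with h | h <;> simp only [h] <;> decide

-- reduce A's nested foldl shape to nested maps
theorem solution_eq_map (n : Int) (arr1 : List Int) (arr2 : List Int) :
    solution n arr1 arr2 =
      (PySem.List.pyRange 0 n 1).map (fun i =>
        String.ofList ((PySem.List.pyRange 0 n 1).map (fun j =>
          if PySem.List.pyGetD (PySem.List.pyGetD (arr1.map (pvRowBits n)) i []) j ' ' == '1'
             || PySem.List.pyGetD (PySem.List.pyGetD (arr2.map (pvRowBits n)) i []) j ' ' == '1'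
          then '#' else ' '))) := by
  unfold solution
  simp only [PySem.List.foldl_append_singleton_eq_map, List.nil_append]

theorem solution_spec : Claim_equal_solution := by
  intro n arr1 arr2 _hdom hpre
  unfold Spec_solution solution_alt
  obtain ⟨h1, h2⟩ := hpre
  rw [solution_eq_map]
  apply List.map_congr_left
  intro i hi
  rw [PySem.List.mem_pyRange_one] at hi
  have hi1 : i.toNat < arr1.length := by omega
  have hi2 : i.toNat < arr2.length := by omega
  congr 1
  -- B's k-range is the reverse of A's j-range
  have hrange : PySem.List.pyRange (n - 1) (-1) (-1) = (PySem.List.pyRange 0 n 1).reverse := by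
    rw [PySem.List.pyRange_neg_one_eq_reverse]
    norm_num
  rw [hrange, List.map_reverse]
  -- resolve the row lookups: pyGetD x i = pvRowBits n (arr1[i]), etc.
  have hx : PySem.List.pyGetD (arr1.map (pvRowBits n)) i [] = pvRowBits n arr1[i.toNat] := by
    rw [PySem.List.pyGetD_eq_getElem _ _ hi.1 (by simpa using by omega)]
    simp
  have hy : PySem.List.pyGetD (arr2.map (pvRowBits n)) i [] = pvRowBits n arr2[i.toNat] := by
    rw [PySem.List.pyGetD_eq_getElem _ _ hi.1 (by simpa using by omega)]
    simp
  have ha : PySem.List.pyGetD arr1 i 0 = arr1[i.toNat] :=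
    PySem.List.pyGetD_eq_getElem _ _ hi.1 (by omega)
  have hb : PySem.List.pyGetD arr2 i 0 = arr2[i.toNat] :=
    PySem.List.pyGetD_eq_getElem _ _ hi.1 (by omega)
  rw [hx, hy, ha, hb, pvRowBits_eq, pvRowBits_eq]
  -- elementwise over the row
  apply List.ext_getElem
  · simp [PySem.List.length_pyRange_one]
  · intro j hjl hjr
    have hN : j < n.toNat := by simpa [PySem.List.length_pyRange_one] using hjl
    have hlen : (PySem.List.pyRange 0 n 1).length = n.toNat := by
      simp [PySem.List.length_pyRange_one]
    have hk : ((0 : Int) + ↑(n.toNat - 1 - j)).toNat = n.toNat - 1 - j := by omega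
    rw [List.getElem_reverse]
    simp only [List.getElem_map, PySem.List.getElem_pyRange_one, List.length_map, hlen, zero_add]
    rw [show ((0:Int) + ((n.toNat - 1 - j : Nat) : Int)) = ((n.toNat - 1 - j : Nat) : Int) from zero_add _] at *
    simp only [Int.toNat_natCast]
    rw [PySem.List.pyGetD_natCast, PySem.List.pyGetD_natCast]
    rw [pvCellBit n.toNat arr1[i.toNat] j hN, pvCellBit n.toNat arr2[i.toNat] j hN]
    simp only [Int.shiftRight_natCast_right]
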